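-- pv_equiv track=rewrite | github.com/macndesign/pistalo | versioning/utils.py | diff_split_by_fields
-- ===== SOURCE A (Python) =====
-- def diff_split_by_fields(txt):
--     """Returns dictionary object, key is fieldname, value is it's diff"""
--     result = {}
--     current = None
--     lines = txt.split("\n")
--     for line in lines:
--         if line[:4] == "--- ":
--             continue
--         if line[:4] == "+++ ":
--             line = line[4:].strip()
--             result[line] = current = []
--             continue
--         if current is not None:
--             current.append(line)
--     for k, v in result.items():
--         result[k] = "\n".join(v)
--     return result
-- ===== SOURCE B (Python) =====
-- def diff_split_by_fields(txt):
--     """Returns dictionary object, key is fieldname, value is it's diff"""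
--     lines = txt.split("\n")
--     n = len(lines)
--     result = {}
--     i = 0
--     # skip everything before the first field marker
--     while i < n and not lines[i].startswith("+++ "):
--         i += 1
--     # each marker starts a block that runs to the next marker (or the end)
--     while i < n:
--         field = lines[i][4:].strip()
--         i += 1
--         start = i
--         while i < n and not lines[i].startswith("+++ "):
--             i += 1
--         block = [l for l in lines[start:i] if not l.startswith("--- ")]
--         result[field] = "\n".join(block)
--     return result
-- ===== Notes on version B (the rewrite author's own statement) =====
-- stated objective: alternative
-- what changed: A makes one stateful pass appending each line to a mutable current-field list and then joins all lists in a second pass over the dict; B instead skips to the first field marker and cuts the line list into whole marker-delimited blocks, filtering removed-file lines and joining each block in one step as it is inserted.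
import Mathlib
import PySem

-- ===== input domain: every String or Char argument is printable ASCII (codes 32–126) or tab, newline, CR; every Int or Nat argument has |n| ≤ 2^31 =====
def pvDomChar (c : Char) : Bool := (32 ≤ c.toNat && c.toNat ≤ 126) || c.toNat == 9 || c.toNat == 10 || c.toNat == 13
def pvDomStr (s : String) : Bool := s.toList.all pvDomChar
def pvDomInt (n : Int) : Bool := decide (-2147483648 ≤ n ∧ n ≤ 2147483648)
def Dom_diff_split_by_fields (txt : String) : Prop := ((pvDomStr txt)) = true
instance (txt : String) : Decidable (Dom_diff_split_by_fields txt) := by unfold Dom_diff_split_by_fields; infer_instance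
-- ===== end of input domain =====

-- B re-decomposes A's single stateful pass as: skip to the first '+++ ' marker, then cut the
-- text into whole marker-delimited blocks, filtering '--- ' lines and joining each block at once
-- ('alternative' objective: same cost, different decomposition).

-- ===== PORT A =====
-- A's loop state: (result : dict field -> list of lines, current : key of the list being filled).
-- Python's 'current' list is always the list stored under the last '+++ ' key, so appending to it
-- is Dict.modify at that key; a duplicate '+++ ' key rebinds current to the fresh [] (insert overwrite).
def diff_split_by_fields (txt : String) : List (String × String) :=
  let lines := (PySem.Str.split? txt "\n").getD []   -- sep "\n" ≠ "": split? is always some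
  let st := lines.foldl
    (fun (st : PySem.Dict String (List String) × Option String) line =>
      if PySem.Str.slice line none (some 4) = "--- " then st
      else if PySem.Str.slice line none (some 4) = "+++ " then
        let k := PySem.Str.strip (PySem.Str.slice line (some 4) none)
        (st.1.insert k [], some k)
      else
        match st.2 with
        | none => st
        | some k => (st.1.modify k [] (fun v => v ++ [line]), st.2))
    (PySem.Dict.empty, none)
  -- second Python loop: result[k] = "\n".join(v) for each key, in place (order kept)
  st.1.items.map (fun p => (p.1, PySem.Str.join "\n" p.2))

-- ===== PORT B =====
def pvMark (l : String) : Bool := PySem.Str.startswith l "+++ "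

-- Source B's outer while loop: the head of the list is a marker line; the inner while loop that
-- advances i to the next marker is takeWhile/dropWhile on the remaining lines.
def pvParseB : List String → PySem.Dict String String → PySem.Dict String String
  | [], d => d
  | l :: rest, d =>
    let field := PySem.Str.strip (PySem.Str.slice l (some 4) none)
    let block := (rest.takeWhile (fun x => !pvMark x)).filter
      (fun x => !PySem.Str.startswith x "--- ")
    pvParseB (rest.dropWhile (fun x => !pvMark x)) (d.insert field (PySem.Str.join "\n" block))
termination_by ls _ => ls.length
decreasing_by
  simp only [List.length_cons]
  exact Nat.lt_succ_of_le (List.length_dropWhile_le _ _)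

def diff_split_by_fields_alt (txt : String) : List (String × String) :=
  let lines := (PySem.Str.split? txt "\n").getD []
  -- Source B's first while loop: skip everything before the first marker
  (pvParseB (lines.dropWhile (fun x => !pvMark x)) PySem.Dict.empty).items

-- ===== PRECONDITION & SPEC =====
def Spec_diff_split_by_fields (txt : String) (out : List (String × String)) : Prop := out = diff_split_by_fields_alt txt
instance (txt : String) (out : List (String × String)) : Decidable (Spec_diff_split_by_fields txt out) := by unfold Spec_diff_split_by_fields; infer_instance

-- ===== CLAIM (what is proved, stated in full; the proofs are below) =====
def Claim_equal_diff_split_by_fields : Prop := ∀ (txt : String), Dom_diff_split_by_fields txt → Spec_diff_split_by_fields txt (diff_split_by_fields txt)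

-- ===== LEMMAS AND PROOFS =====

-- A's loop body, named so the lemmas can speak about it (definitionally the lambda in the port)
def pvStepA (st : PySem.Dict String (List String) × Option String) (line : String) :
    PySem.Dict String (List String) × Option String :=
  if PySem.Str.slice line none (some 4) = "--- " then st
  else if PySem.Str.slice line none (some 4) = "+++ " then
    let k := PySem.Str.strip (PySem.Str.slice line (some 4) none)
    (st.1.insert k [], some k)
  else
    match st.2 with
    | none => st
    | some k => (st.1.modify k [] (fun v => v ++ [line]), st.2)

-- joining A's per-field line lists gives B's per-field strings
def pvMapJoin (d : PySem.Dict String (List String)) : List (String × String) :=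
  d.items.map (fun p => (p.1, PySem.Str.join "\n" p.2))

lemma pvA_unfold (txt : String) :
    diff_split_by_fields txt =
      pvMapJoin (((PySem.Str.split? txt "\n").getD []).foldl pvStepA (PySem.Dict.empty, none)).1 := rfl

-- "line[:4] == p" (p of length 4) is exactly startswith
lemma pvSliceEq_iff (l p : String) (hp : p.toList.length = 4) :
    (PySem.Str.slice l none (some 4) = p) ↔ PySem.Str.startswith l p = true := by
  rw [← String.toList_inj, PySem.Str.toList_slice, PySem.Str.startswith_eq,
    PySem.Chars.startswith_iff]
  show PySem.List.slice _ none (some 4) = _ ↔ _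
  rw [PySem.List.slice_to (xs := l.toList) (b := 4) (by norm_num), List.prefix_iff_eq_take, hp]
  constructor <;> intro h <;> exact h.symm

lemma pvDropWhile_head_false {α} (p : α → Bool) :
    ∀ (xs : List α) {y : α} {ys : List α}, xs.dropWhile p = y :: ys → p y = false := by
  intro xs
  induction xs with
  | nil => intro y ys h; simp [List.dropWhile] at h
  | cons a l ih =>
    intro y ys h
    by_cases hp : p a
    · rw [List.dropWhile_cons_of_pos hp] at h; exact ih h
    · rw [List.dropWhile_cons_of_neg hp] at h
      cases h; simpa using hp

-- with no current list, non-marker lines are no-ops for A's loop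
lemma pvSkip_none (lines : List String) (d : PySem.Dict String (List String)) :
    lines.foldl pvStepA (d, none) =
      (lines.dropWhile (fun x => !pvMark x)).foldl pvStepA (d, none) := by
  induction lines with
  | nil => rfl
  | cons l rest ih =>
    by_cases hm : pvMark l = true
    · rw [List.dropWhile_cons_of_neg (by simp [hm])]
    · rw [List.dropWhile_cons_of_pos (by simp [hm])]
      have hstep : pvStepA (d, none) l = (d, none) := by
        unfold pvStepA
        split_ifs with h1 h2
        · rfl
        · exact absurd ((pvSliceEq_iff l "+++ " rfl).mp h2) (by simpa using hm)
        · rfl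
      rw [List.foldl_cons, hstep, ih]

-- A's loop at a marker line
lemma pvStep_marker (st : PySem.Dict String (List String) × Option String) (l : String)
    (hm : pvMark l = true) :
    pvStepA st l =
      (st.1.insert (PySem.Str.strip (PySem.Str.slice l (some 4) none)) [],
        some (PySem.Str.strip (PySem.Str.slice l (some 4) none))) := by
  have hplus : PySem.Str.slice l none (some 4) = "+++ " := (pvSliceEq_iff l "+++ " rfl).mpr hm
  have hdash : ¬ (PySem.Str.slice l none (some 4) = "--- ") := by
    rw [hplus]; decide
  unfold pvStepA
  rw [if_neg hdash, if_pos hplus]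

-- over a marker-free block, A's loop appends its non-'--- ' lines to the current list
lemma pvBlock_absorb (tk : List String) (h : ∀ x ∈ tk, pvMark x = false) :
    ∀ (d : PySem.Dict String (List String)) (k : String) (acc : List String),
      tk.foldl pvStepA (d.insert k acc, some k) =
        (d.insert k (acc ++ tk.filter (fun x => !PySem.Str.startswith x "--- ")), some k) := by
  induction tk with
  | nil => intro d k acc; simp
  | cons l tk' ih =>
    intro d k acc
    have hm : pvMark l = false := h l (by simp)
    have hm' : PySem.Str.startswith l "+++ " = false := hm
    have hplus : ¬ (PySem.Str.slice l none (some 4) = "+++ ") := by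
      rw [pvSliceEq_iff l "+++ " rfl, Bool.not_eq_true]; exact hm'
    have htail : ∀ x ∈ tk', pvMark x = false := fun x hx => h x (by simp [hx])
    by_cases hd : PySem.Str.slice l none (some 4) = "--- "
    · have hds : PySem.Str.startswith l "--- " = true := (pvSliceEq_iff l "--- " rfl).mp hd
      have hstep : pvStepA (d.insert k acc, some k) l = (d.insert k acc, some k) := by
        unfold pvStepA; rw [if_pos hd]
      rw [List.foldl_cons, hstep, ih htail d k acc,
        List.filter_cons_of_neg
          (by rw [Bool.not_eq_true]; show (!PySem.Str.startswith l "--- ") = false; rw [hds]; rfl)]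
    · have hds : PySem.Str.startswith l "--- " = false := by
        rw [← Bool.not_eq_true, ← pvSliceEq_iff l "--- " rfl]; exact hd
      have hstep : pvStepA (d.insert k acc, some k) l = (d.insert k (acc ++ [l]), some k) := by
        unfold pvStepA
        rw [if_neg hd, if_neg hplus]
        simp [PySem.Dict.modify, PySem.Dict.getD_insert_self, PySem.Dict.insert_insert_self]
      rw [List.foldl_cons, hstep, ih htail d k (acc ++ [l]),
        List.filter_cons_of_pos (by show (!PySem.Str.startswith l "--- ") = true; rw [hds]; rfl),
        List.append_assoc]
      rfl

-- pvMapJoin commutes with inserting one field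
lemma pvMapJoin_insert (dA : PySem.Dict String (List String)) (dB : PySem.Dict String String)
    (hR : pvMapJoin dA = dB.items) (k : String) (v : List String) :
    pvMapJoin (dA.insert k v) = (dB.insert k (PySem.Str.join "\n" v)).items := by
  have hkeys : dB.keys = dA.keys := by
    show dB.items.map Prod.fst = dA.items.map Prod.fst
    rw [← hR]; unfold pvMapJoin; rw [List.map_map]; rfl
  have hcont : dA.contains k = dB.contains k := by
    rw [PySem.Dict.contains_eq_decide_mem_keys, PySem.Dict.contains_eq_decide_mem_keys, hkeys]
  unfold pvMapJoin
  by_cases hc : dA.contains k = true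
  · rw [PySem.Dict.items_insert_of_contains _ _ hc,
      PySem.Dict.items_insert_of_contains _ _ (by rw [← hcont]; exact hc), ← hR]
    unfold pvMapJoin
    rw [List.map_map, List.map_map]
    apply List.map_congr_left
    intro p _
    by_cases hp : p.1 = k <;> simp [hp]
  · rw [PySem.Dict.items_insert_of_not_contains _ _ (by simpa using hc),
      PySem.Dict.items_insert_of_not_contains _ _
        (by rw [← hcont]; simpa using hc), ← hR]
    unfold pvMapJoin
    rw [List.map_append]
    rfl

-- main alignment invariant: from any aligned point (list empty or marker-headed after the skip),
-- A's remaining loop and B's block recursion build matching dictionaries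
lemma pvKeyAligned (n : Nat) :
    ∀ (lines : List String) (dA : PySem.Dict String (List String)) (c : Option String)
      (dB : PySem.Dict String String), lines.length ≤ n → pvMapJoin dA = dB.items →
      pvMapJoin (((lines.dropWhile (fun x => !pvMark x)).foldl pvStepA (dA, c)).1) =
        (pvParseB (lines.dropWhile (fun x => !pvMark x)) dB).items := by
  induction n with
  | zero =>
    intro lines dA c dB hn hR
    have : lines = [] := List.length_eq_zero_iff.mp (Nat.le_zero.mp hn)
    subst this
    simpa [pvParseB] using hR
  | succ n ih =>
    intro lines dA c dB hn hR
    cases hL : lines.dropWhile (fun x => !pvMark x) with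
    | nil => simpa [pvParseB] using hR
    | cons l rest =>
      have hm : pvMark l = true := by
        have := pvDropWhile_head_false (fun x => !pvMark x) lines hL
        simpa using this
      have hlen : rest.length ≤ n := by
        have h1 : (l :: rest).length ≤ lines.length := by
          rw [← hL]; exact List.length_dropWhile_le _ _
        simp only [List.length_cons] at h1
        omega
      set k := PySem.Str.strip (PySem.Str.slice l (some 4) none) with hk
      set blk := (rest.takeWhile (fun x => !pvMark x)).filter
        (fun x => !PySem.Str.startswith x "--- ") with hblk
      -- left side
      have lhs_eq : ((l :: rest).foldl pvStepA (dA, c)).1 =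
          (((rest.dropWhile (fun x => !pvMark x)).foldl pvStepA (dA.insert k blk, some k)).1) := by
        rw [List.foldl_cons, pvStep_marker _ _ hm, ← hk]
        conv_lhs => rw [← List.takeWhile_append_dropWhile (p := fun x => !pvMark x) (l := rest)]
        rw [List.foldl_append]
        rw [pvBlock_absorb _ (fun x hx => by simpa using List.mem_takeWhile_imp hx) dA k []]
        rw [List.nil_append, ← hblk]
      rw [lhs_eq]
      -- right side
      have rhs_eq : pvParseB (l :: rest) dB =
          pvParseB (rest.dropWhile (fun x => !pvMark x))
            (dB.insert k (PySem.Str.join "\n" blk)) := by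
        rw [pvParseB]
      rw [rhs_eq]
      exact ih rest (dA.insert k blk) (some k) (dB.insert k (PySem.Str.join "\n" blk)) hlen
        (pvMapJoin_insert dA dB hR k blk)

-- ===== VERDICT (by name: the statement is the Claim_ definition above) =====
theorem diff_split_by_fields_spec : Claim_equal_diff_split_by_fields := by
  intro txt _
  unfold Spec_diff_split_by_fields
  rw [pvA_unfold]
  unfold diff_split_by_fields_alt
  rw [pvSkip_none]
  exact pvKeyAligned ((PySem.Str.split? txt "\n").getD []).length
    ((PySem.Str.split? txt "\n").getD []) PySem.Dict.empty none PySem.Dict.empty (le_refl _) rfl
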